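-- pv_equiv track=rewrite | github.com/levandow/grants-hello | app/normalize.py | _split_documents_vs_links
-- ===== SOURCE A (Python) =====
-- from typing import Any, Dict, List, Optional, Tuple
--
-- _DOC_KEYWORDS = (
--     "call", "work programme", "work program", "guide", "guidance",
--     "template", "terms", "conditions", "instructions"
-- )
--
-- def _split_documents_vs_links(links: List[Dict[str, Optional[str]]]):
--     """PDFs or doc-like labels -> documents; others -> links."""
--     docs, other = [], []
--     for l in links:
--         url = (l.get("url") or "").strip()
--         label = (l.get("label") or "").strip()
--         lower = f"{label} {url}".lower()
--         is_pdf = url.lower().endswith(".pdf")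
--         is_doc_like = is_pdf or any(k in lower for k in _DOC_KEYWORDS)
--         doc_item = {
--             "title": label or None, "description": None, "url": url, "lang": None,
--             "primary": None, "filename": None, "external_id": None
--         }
--         if is_doc_like:
--             docs.append(doc_item)
--         else:
--             other.append({"label": label or None, "url": url})
--     # de-dup by URL
--     def dedupe(lst, key):
--         seen = set(); out = []
--         for x in lst:
--             k = x.get(key)
--             if k and k not in seen:
--                 seen.add(k); out.append(x)
--         return out
--     return dedupe(docs, "url"), dedupe(other, "url")
-- ===== SOURCE B (Python) =====
-- from typing import Dict, List, Optional
--
-- _DOC_KEYWORDS = (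
--     "call", "work programme", "work program", "guide", "guidance",
--     "template", "terms", "conditions", "instructions"
-- )
--
-- def _split_documents_vs_links(links: List[Dict[str, Optional[str]]]):
--     """Single pass: classify and dedupe by URL at once, with two seen-sets."""
--     docs, other = [], []
--     seen_docs, seen_other = set(), set()
--     for l in links:
--         url = (l.get("url") or "").strip()
--         label = (l.get("label") or "").strip()
--         lower = f"{label} {url}".lower()
--         is_doc_like = url.lower().endswith(".pdf") or any(k in lower for k in _DOC_KEYWORDS)
--         if is_doc_like:
--             if url and url not in seen_docs:
--                 seen_docs.add(url)
--                 docs.append({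
--                     "title": label or None, "description": None, "url": url, "lang": None,
--                     "primary": None, "filename": None, "external_id": None
--                 })
--         else:
--             if url and url not in seen_other:
--                 seen_other.add(url)
--                 other.append({"label": label or None, "url": url})
--     return docs, other
-- ===== Notes on version B (the rewrite author's own statement) =====
-- stated objective: simpler
-- what changed: Replaces A's three loops (classify into two lists, then a separate dedupe pass over each) with a single pass that classifies and dedupes at once, maintaining two seen-sets; the dedupe helper disappears.
import Mathlib
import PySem

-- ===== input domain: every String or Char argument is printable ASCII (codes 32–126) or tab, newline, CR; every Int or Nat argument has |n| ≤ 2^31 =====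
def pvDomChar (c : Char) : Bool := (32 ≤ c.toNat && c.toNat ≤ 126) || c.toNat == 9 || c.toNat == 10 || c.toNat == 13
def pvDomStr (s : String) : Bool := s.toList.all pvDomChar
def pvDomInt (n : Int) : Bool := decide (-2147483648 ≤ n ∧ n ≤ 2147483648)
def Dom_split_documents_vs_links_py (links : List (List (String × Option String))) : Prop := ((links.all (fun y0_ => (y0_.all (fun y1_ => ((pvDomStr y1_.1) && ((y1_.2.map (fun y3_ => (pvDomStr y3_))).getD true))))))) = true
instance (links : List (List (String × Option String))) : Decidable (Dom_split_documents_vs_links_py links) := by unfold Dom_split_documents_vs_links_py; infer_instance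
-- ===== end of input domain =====

-- B fuses A's classify-then-dedupe-each-list three-loop structure into one pass with two seen-sets (objective: simpler, same behaviour).

-- ===== PORT A =====
def pvKeywords : List String :=
  ["call", "work programme", "work program", "guide", "guidance",
   "template", "terms", "conditions", "instructions"]

-- the classification loop of A: appends each link's item to docs or other
def pvClassifyA (ls : List (List (String × Option String)))
    (acc : List (List (String × Option String)) × List (List (String × Option String))) :
    List (List (String × Option String)) × List (List (String × Option String)) :=
  match ls with
  | [] => acc
  | l :: rest =>
    let url := PySem.Str.strip ((((PySem.Dict.mk l).get? "url").join).getD "")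
    let label := PySem.Str.strip ((((PySem.Dict.mk l).get? "label").join).getD "")
    let lower := PySem.Str.lower (PySem.Str.join " " [label, url])
    let is_pdf := PySem.Str.endswith (PySem.Str.lower url) ".pdf"
    let is_doc_like := is_pdf || pvKeywords.any (fun k => PySem.Str.isIn k lower)
    let doc_item : List (String × Option String) :=
      [("title", if label = "" then none else some label), ("description", none),
       ("url", some url), ("lang", none), ("primary", none), ("filename", none),
       ("external_id", none)]
    if is_doc_like then pvClassifyA rest (acc.1 ++ [doc_item], acc.2)
    else pvClassifyA rest
      (acc.1, acc.2 ++ [[("label", if label = "" then none else some label), ("url", some url)]])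

-- A's inner 'dedupe' loop, carrying (seen, out)
def pvDedupeGo (lst : List (List (String × Option String))) (seen : PySem.Set String)
    (out : List (List (String × Option String))) :
    PySem.Set String × List (List (String × Option String)) :=
  match lst with
  | [] => (seen, out)
  | x :: rest =>
    match (PySem.Dict.mk x).get? "url" with
    | some (some s) =>
      if (s != "") && !(PySem.Set.contains seen s) then
        pvDedupeGo rest (PySem.Set.add seen s) (out ++ [x])
      else pvDedupeGo rest seen out
    | _ => pvDedupeGo rest seen out

def split_documents_vs_links_py (links : List (List (String × Option String))) :
    (List (List (String × Option String))) × (List (List (String × Option String))) :=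
  let p := pvClassifyA links ([], [])
  ((pvDedupeGo p.1 PySem.Set.empty []).2, (pvDedupeGo p.2 PySem.Set.empty []).2)

-- ===== PORT B =====
-- B's single loop: classify and dedupe at once, with two seen-sets
def pvLoopB (ls : List (List (String × Option String)))
    (docs other : List (List (String × Option String)))
    (seenD seenO : PySem.Set String) :
    List (List (String × Option String)) × List (List (String × Option String)) :=
  match ls with
  | [] => (docs, other)
  | l :: rest =>
    let url := PySem.Str.strip ((((PySem.Dict.mk l).get? "url").join).getD "")
    let label := PySem.Str.strip ((((PySem.Dict.mk l).get? "label").join).getD "")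
    let lower := PySem.Str.lower (PySem.Str.join " " [label, url])
    let is_doc_like := PySem.Str.endswith (PySem.Str.lower url) ".pdf"
      || pvKeywords.any (fun k => PySem.Str.isIn k lower)
    if is_doc_like then
      if (url != "") && !(PySem.Set.contains seenD url) then
        pvLoopB rest
          (docs ++ [[("title", if label = "" then none else some label), ("description", none),
            ("url", some url), ("lang", none), ("primary", none), ("filename", none),
            ("external_id", none)]])
          other (PySem.Set.add seenD url) seenO
      else pvLoopB rest docs other seenD seenO
    else
      if (url != "") && !(PySem.Set.contains seenO url) then
        pvLoopB rest docs
          (other ++ [[("label", if label = "" then none else some label), ("url", some url)]])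
          seenD (PySem.Set.add seenO url)
      else pvLoopB rest docs other seenD seenO

def split_documents_vs_links_py_alt (links : List (List (String × Option String))) :
    (List (List (String × Option String))) × (List (List (String × Option String))) :=
  pvLoopB links [] [] PySem.Set.empty PySem.Set.empty

-- ===== PRECONDITION & SPEC =====
def Spec_split_documents_vs_links_py (links : List (List (String × Option String))) (out : (List (List (String × Option String))) × (List (List (String × Option String)))) : Prop := out = split_documents_vs_links_py_alt links
instance (links : List (List (String × Option String))) (out : (List (List (String × Option String))) × (List (List (String × Option String)))) : Decidable (Spec_split_documents_vs_links_py links out) := by unfold Spec_split_documents_vs_links_py; infer_instance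

-- ===== CLAIM (what is proved, stated in full; the proofs are below) =====
def Claim_equal_split_documents_vs_links_py : Prop := ∀ (links : List (List (String × Option String))), Dom_split_documents_vs_links_py links → Spec_split_documents_vs_links_py links (split_documents_vs_links_py links)

-- ===== LEMMAS AND PROOFS =====
-- proof-side spec of A's classification loop, built by cons instead of append
def pvCls (ls : List (List (String × Option String))) :
    List (List (String × Option String)) × List (List (String × Option String)) :=
  match ls with
  | [] => ([], [])
  | l :: rest =>
    let url := PySem.Str.strip ((((PySem.Dict.mk l).get? "url").join).getD "")
    let label := PySem.Str.strip ((((PySem.Dict.mk l).get? "label").join).getD "")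
    let lower := PySem.Str.lower (PySem.Str.join " " [label, url])
    let is_doc_like := PySem.Str.endswith (PySem.Str.lower url) ".pdf"
      || pvKeywords.any (fun k => PySem.Str.isIn k lower)
    if is_doc_like then
      ([("title", if label = "" then none else some label), ("description", none),
        ("url", some url), ("lang", none), ("primary", none), ("filename", none),
        ("external_id", none)] :: (pvCls rest).1, (pvCls rest).2)
    else
      ((pvCls rest).1,
       [("label", if label = "" then none else some label), ("url", some url)] :: (pvCls rest).2)

lemma pvClassifyA_eq (ls : List (List (String × Option String)))
    (d o : List (List (String × Option String))) :
    pvClassifyA ls (d, o) = (d ++ (pvCls ls).1, o ++ (pvCls ls).2) := by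
  induction ls generalizing d o with
  | nil => simp [pvClassifyA, pvCls]
  | cons l rest ih =>
    simp only [pvClassifyA, pvCls]
    split_ifs <;> rw [ih] <;> simp

-- the fused loop of B equals A's dedupe of A's classification, for any running state
lemma pvLoopB_eq (ls : List (List (String × Option String)))
    (docs other : List (List (String × Option String))) (sD sO : PySem.Set String) :
    pvLoopB ls docs other sD sO =
      ((pvDedupeGo (pvCls ls).1 sD docs).2, (pvDedupeGo (pvCls ls).2 sO other).2) := by
  induction ls generalizing docs other sD sO with
  | nil => simp [pvLoopB, pvCls, pvDedupeGo]
  | cons l rest ih =>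
    simp only [pvLoopB, pvCls]
    split_ifs <;>
      simp_all [pvDedupeGo, PySem.Dict.get?_mk_cons] <;>
      (split_ifs with hc <;> simp_all)

-- ===== VERDICT (by name: the statement is the Claim_ definition above) =====
theorem split_documents_vs_links_py_spec : Claim_equal_split_documents_vs_links_py := by
  intro links _
  unfold Spec_split_documents_vs_links_py split_documents_vs_links_py split_documents_vs_links_py_alt
  rw [pvClassifyA_eq, pvLoopB_eq]
  simp
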